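-- pv_equiv track=rewrite | github.com/HuyaneMatsu/hata | hata/discord/bases/flags/flag_meta.py | _is_reverse_descriptors_contradiction
-- ===== SOURCE A (Python) =====
-- def _is_reverse_descriptors_contradiction(accumulated_reverse_descriptors):
--     """
--     Returns whether there is a contradiction in `accumulated_reverse_descriptors` values.
--
--     Parameters
--     ----------
--     accumulated_reverse_descriptors : `set<(str, bool)>`
--         Accumulated `__reverse_descriptors__` values.
--
--     Returns
--     -------
--     is_reverse_descriptors_contradiction : `bool`
--     """
--     iterator = iter(accumulated_reverse_descriptors)
--     while True:
--         item = next(iterator, None)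
--
--         # No more items left.
--         if item is None:
--             return False
--
--         stated_value = item[1]
--         # Ignore item if `-1`.
--         if stated_value == -1:
--             continue
--
--         break
--
--     for item in iterator:
--         value = item[1]
--         # Ignore item if `-1`.
--         if value == -1:
--             continue
--
--         if value == stated_value:
--             continue
--
--         return True
--
--     return False
-- ===== SOURCE B (Python) =====
-- def _is_reverse_descriptors_contradiction(accumulated_reverse_descriptors):
--     distinct = {value for _, value in accumulated_reverse_descriptors if value != -1}
--     return len(distinct) > 1
-- ===== Notes on version B (the rewrite author's own statement) =====
-- stated objective: simpler
-- what changed: Replaces A's two-phase anchor-then-compare iterator scan (with -1 skipping and early return) by a one-line set comprehension of the distinct non-(-1) values followed by a cardinality test len(distinct) > 1.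
import Mathlib
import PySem

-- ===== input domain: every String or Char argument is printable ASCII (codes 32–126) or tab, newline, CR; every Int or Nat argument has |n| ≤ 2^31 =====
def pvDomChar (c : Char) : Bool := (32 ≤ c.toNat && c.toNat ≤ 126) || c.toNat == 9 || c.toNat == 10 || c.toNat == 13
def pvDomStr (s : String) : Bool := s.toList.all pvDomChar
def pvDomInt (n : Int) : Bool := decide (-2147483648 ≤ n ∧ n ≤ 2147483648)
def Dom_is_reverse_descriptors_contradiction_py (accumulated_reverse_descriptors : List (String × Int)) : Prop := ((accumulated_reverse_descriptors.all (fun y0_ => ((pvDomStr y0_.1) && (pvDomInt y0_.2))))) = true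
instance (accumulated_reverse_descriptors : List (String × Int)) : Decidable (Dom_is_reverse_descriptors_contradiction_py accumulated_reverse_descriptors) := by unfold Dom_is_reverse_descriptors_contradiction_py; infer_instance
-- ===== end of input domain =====

-- B replaces A's two-phase anchor-then-compare scan by collecting the distinct non-(-1)
-- values into a set and testing whether more than one appears (objective: simpler).


-- ===== PORT A =====
-- second loop of A: compare each remaining non-(-1) value against the anchor
def pvAScan (stated_value : Int) : List (String × Int) → Bool
  | [] => false
  | item :: rest =>
    let value := item.2
    if value = -1 then pvAScan stated_value rest
    else if value = stated_value then pvAScan stated_value rest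
    else true

def is_reverse_descriptors_contradiction_py : List (String × Int) → Bool
  | [] => false
  | item :: rest =>
    let stated_value := item.2
    if stated_value = -1 then is_reverse_descriptors_contradiction_py rest
    else pvAScan stated_value rest

-- ===== PORT B =====
def is_reverse_descriptors_contradiction_py_alt (accumulated_reverse_descriptors : List (String × Int)) : Bool :=
  let distinct := PySem.Set.ofList
    ((accumulated_reverse_descriptors.filter (fun p => p.2 ≠ -1)).map (fun p => p.2))
  decide (1 < PySem.Set.len distinct)

-- ===== PRECONDITION & SPEC =====
def Spec_is_reverse_descriptors_contradiction_py (accumulated_reverse_descriptors : List (String × Int)) (out : Bool) : Prop := out = is_reverse_descriptors_contradiction_py_alt accumulated_reverse_descriptors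
instance (accumulated_reverse_descriptors : List (String × Int)) (out : Bool) : Decidable (Spec_is_reverse_descriptors_contradiction_py accumulated_reverse_descriptors out) := by unfold Spec_is_reverse_descriptors_contradiction_py; infer_instance

-- ===== CLAIM (what is proved, stated in full; the proofs are below) =====
def Claim_equal_is_reverse_descriptors_contradiction_py : Prop := ∀ (accumulated_reverse_descriptors : List (String × Int)), Dom_is_reverse_descriptors_contradiction_py accumulated_reverse_descriptors → Spec_is_reverse_descriptors_contradiction_py accumulated_reverse_descriptors (is_reverse_descriptors_contradiction_py accumulated_reverse_descriptors)

-- ===== LEMMAS AND PROOFS =====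

-- A nodup list all of whose elements equal v has at most one element.
theorem pv_nodup_all_eq_len_le_one {l : List Int} {v : Int}
    (hnd : l.Nodup) (hall : ∀ y ∈ l, y = v) : l.length ≤ 1 := by
  cases l with
  | nil => simp
  | cons y t =>
    have hy : y = v := hall y (by simp)
    cases t with
    | nil => simp
    | cons z u =>
      exfalso
      have hz : z = v := hall z (by simp)
      have hynd := (List.nodup_cons.mp hnd).1
      exact hynd ((hy.trans hz.symm) ▸ List.mem_cons_self)

-- key: A's scan over the remaining values versus B's cardinality test
theorem pv_any_ne_iff_card (v : Int) (ws : List Int) :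
    (ws.any (fun w => decide (w ≠ v))) =
      decide (1 < (PySem.Set.ofList (v :: ws)).length) := by
  apply Bool.eq_iff_iff.mpr
  simp only [List.any_eq_true, decide_eq_true_eq]
  constructor
  · rintro ⟨w, hw, hne⟩
    have hv : v ∈ PySem.Set.ofList (v :: ws) := (PySem.Set.mem_ofList _ _).mpr (by simp)
    have hwm : w ∈ PySem.Set.ofList (v :: ws) := (PySem.Set.mem_ofList _ _).mpr (by simp [hw])
    by_contra hle
    have hle1 : (PySem.Set.ofList (v :: ws)).length ≤ 1 := by omega
    interval_cases hl : (PySem.Set.ofList (v :: ws)).length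
    · have := List.length_eq_zero_iff.mp hl
      simp [this] at hv
    · obtain ⟨a, ha⟩ := List.length_eq_one_iff.mp hl
      rw [ha] at hv hwm
      simp at hv hwm
      exact hne (hwm.trans hv.symm)
  · intro hlen
    by_contra h
    push Not at h
    have hall : ∀ y ∈ PySem.Set.ofList (v :: ws), y = v := by
      intro y hy
      have : y ∈ v :: ws := (PySem.Set.mem_ofList _ _).mp hy
      rcases List.mem_cons.mp this with h1 | h2
      · exact h1
      · exact h y h2
    have hle := pv_nodup_all_eq_len_le_one (PySem.Set.nodup_ofList (v :: ws)) hall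
    omega

theorem pvAScan_eq (v : Int) (xs : List (String × Int)) :
    pvAScan v xs = ((xs.filter (fun p => p.2 ≠ -1)).map (fun p => p.2)).any
      (fun w => decide (w ≠ v)) := by
  induction xs with
  | nil => rfl
  | cons p rest ih =>
    show (if p.2 = -1 then pvAScan v rest
        else if p.2 = v then pvAScan v rest else true) = _
    by_cases h1 : p.2 = -1
    · rw [if_pos h1, ih, List.filter_cons, if_neg (by simp [h1])]
    · by_cases h2 : p.2 = v
      · rw [if_neg h1, if_pos h2, ih, List.filter_cons, if_pos (by simpa using h1),
          List.map_cons, List.any_cons]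
        simp [h2]
      · rw [if_neg h1, if_neg h2, List.filter_cons, if_pos (by simpa using h1),
          List.map_cons, List.any_cons]
        simp [h2]

theorem pv_main (xs : List (String × Int)) :
    is_reverse_descriptors_contradiction_py xs =
      is_reverse_descriptors_contradiction_py_alt xs := by
  induction xs with
  | nil => rfl
  | cons p rest ih =>
    by_cases h1 : p.2 = -1
    · simpa [is_reverse_descriptors_contradiction_py,
        is_reverse_descriptors_contradiction_py_alt, h1, List.filter_cons] using ih
    · show (if p.2 = -1 then is_reverse_descriptors_contradiction_py rest
          else pvAScan p.2 rest) = _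
      rw [if_neg h1, pvAScan_eq,
        show is_reverse_descriptors_contradiction_py_alt (p :: rest)
          = decide (1 < (PySem.Set.ofList
              (((p :: rest).filter (fun q => q.2 ≠ -1)).map (fun q => q.2))).length) from by
          simp [is_reverse_descriptors_contradiction_py_alt, PySem.Set.len],
        List.filter_cons, if_pos (by simpa using h1), List.map_cons,
        pv_any_ne_iff_card]

-- ===== VERDICT (by name: the statement is the Claim_ definition above) =====
theorem is_reverse_descriptors_contradiction_py_spec : Claim_equal_is_reverse_descriptors_contradiction_py := by
  intro xs _
  unfold Spec_is_reverse_descriptors_contradiction_py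
  exact pv_main xs
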